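-- pv_equiv track=rewrite | github.com/ToGiaBaoKDL/Sudoku_OCR | src/utils/visualization.py | format_sudoku_board
-- ===== SOURCE A (Python) =====
-- def format_sudoku_board(board, box_height=3, box_width=3):
--     size = box_height * box_width
--     cell_length = len(str(size))
--     format_int = '{0:0' + str(cell_length) + 'd}'
--     table = ''
--
--     for i, row in enumerate(board):
--         if i == 0:
--             table += ('+-' + '-' * (cell_length + 1) * box_width) * box_height + '+\n'
--         table += (
--             ('| ' + '{} ' * box_width) * box_height + '|'
--         ).format(*[format_int.format(x) if x is not None and x != 0 else ' ' * cell_length for x in row]) + '\n'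
--         if i == size - 1 or (i + 1) % box_height == 0:
--             table += ('+-' + '-' * (cell_length + 1) * box_width) * box_height + '+\n'
--     return table
-- ===== SOURCE B (Python) =====
-- def format_sudoku_board(board, box_height=3, box_width=3):
--     size = box_height * box_width
--     width = len(str(size))
--     sep = ('+-' + '-' * ((width + 1) * box_width)) * box_height + '+'
--
--     def render(row):
--         cells = iter(str(x).zfill(width) if x is not None and x != 0 else ' ' * width
--                      for x in row)
--         parts = ['|']
--         for _ in range(box_height):
--             parts += [next(cells) for _ in range(box_width)] + ['|']
--         return ' '.join(parts)
--
--     if not board: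
--         return ''
--     cuts = [m for m in range(1, len(board) + 1) if m % box_height == 0]
--     lines = [sep]
--     start = 0
--     for c in cuts:
--         lines += [render(r) for r in board[start:c]]
--         lines.append(sep)
--         start = c
--     lines += [render(r) for r in board[start:]]
--     return '\n'.join(lines) + '\n'
-- ===== Notes on version B (the rewrite author's own statement) =====
-- stated objective: alternative
-- what changed: B precomputes the separator cut positions arithmetically (the multiples of box_height up to the row count), slices the board into the segments between cuts, and renders each row as a single ' '.join of pipe-interleaved cell chunks drawn from a cell iterator, joining all lines once at the end - instead of A's single '+='-pass that formats a multiplied '{} ' template per row and tests 'i == size-1 or (i+1) % box_height == 0' on every row; Pre_ excludes only inputs where A raises (box_height = 0 with a nonempty board: ZeroDivisionError; …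
import Mathlib
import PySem

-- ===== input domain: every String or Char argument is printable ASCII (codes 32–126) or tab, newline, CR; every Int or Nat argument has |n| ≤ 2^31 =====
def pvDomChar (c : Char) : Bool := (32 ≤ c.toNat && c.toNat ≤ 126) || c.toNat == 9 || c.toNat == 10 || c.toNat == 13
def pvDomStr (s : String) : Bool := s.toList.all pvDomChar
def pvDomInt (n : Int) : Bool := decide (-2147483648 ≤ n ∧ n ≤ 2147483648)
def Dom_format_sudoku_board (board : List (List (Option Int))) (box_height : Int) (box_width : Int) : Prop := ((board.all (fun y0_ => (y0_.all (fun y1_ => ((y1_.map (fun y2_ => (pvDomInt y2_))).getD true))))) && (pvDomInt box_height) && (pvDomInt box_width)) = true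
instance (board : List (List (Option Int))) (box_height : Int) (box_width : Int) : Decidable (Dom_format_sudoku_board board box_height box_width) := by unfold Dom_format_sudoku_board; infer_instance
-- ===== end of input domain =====

-- B precomputes the separator cut positions arithmetically, slices the board into the segments
-- between cuts, and renders each row as one ' '.join of pipe-interleaved cell chunks taken from a
-- cell iterator, joining all lines once — instead of A's per-row '+='-pass that formats a
-- multiplied '{} ' template and tests the boundary condition on every row; objective: alternative.

-- ===== PORT A =====
-- "format_int.format(x)" on an int x with format '{0:0Nd}' is exactly str(x).zfill(N); ' ' * N is pyRepeat.
def pvFmtCell_A (cl : Int) (x : Option Int) : List Char :=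
  match x with
  | some v => if v ≠ 0 then PySem.Chars.zfill (PySem.Int.toChars v) cl
              else PySem.List.pyRepeat [' '] cl
  | none => PySem.List.pyRepeat [' '] cl

-- str.format with positional '{}' holes, hand-ported step for step: copy plain characters,
-- each '{}' consumes the next argument; none = IndexError (too few arguments), exact there.
def pvFill : List Char → List (List Char) → Option (List Char)
  | '{' :: '}' :: rest, args =>
      match args with
      | [] => none
      | a :: args' => (pvFill rest args').map (a ++ ·)
  | c :: rest, args => (pvFill rest args).map (c :: ·)
  | [], _ => some []

-- literal port of A: '+='-grown table string over enumerate(board); the Option accumulator is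
-- none exactly where .format raises IndexError (excluded by Pre_).
def format_sudoku_board (board : List (List (Option Int))) (box_height : Int) (box_width : Int) : String :=
  let size := box_height * box_width
  let cell_length : Int := ((PySem.Int.toChars size).length : Int)
  let sep := PySem.List.pyRepeat ("+-".toList ++ PySem.List.pyRepeat (PySem.List.pyRepeat ['-'] (cell_length + 1)) box_width) box_height ++ "+\n".toList
  let templ := PySem.List.pyRepeat ("| ".toList ++ PySem.List.pyRepeat "{} ".toList box_width) box_height ++ "|".toList
  let res : Option (List Char) :=
    (PySem.List.enumerate board).foldl
      (fun acc p =>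
        acc.bind (fun t =>
          (pvFill templ (p.2.map (pvFmtCell_A cell_length))).map (fun line =>
            if p.1 = size - 1 ∨ PySem.Int.mod (p.1 + 1) box_height = 0
            then ((if p.1 = 0 then t ++ sep else t) ++ line ++ ['\n']) ++ sep
            else (if p.1 = 0 then t ++ sep else t) ++ line ++ ['\n'])))
      (some [])
  String.ofList (res.getD [])

-- ===== PORT B =====
def pvFmtCell_B (cl : Int) (x : Option Int) : List Char :=
  match x with
  | some v => if v ≠ 0 then PySem.Chars.zfill (PySem.Int.toChars v) cl
              else PySem.List.pyRepeat [' '] cl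
  | none => PySem.List.pyRepeat [' '] cl

-- Source B's render(row): the cell iterator is modelled by the list of not-yet-consumed cells (st.2);
-- '[next(cells) for _ in range(box_width)]' takes box_width cells (none for box_width ≤ 0, exactly
-- like range; Pre_ guarantees the iterator never runs dry), and '|' is interleaved between chunks.
def pvRender_B (cl bh bw : Int) (row : List (Option Int)) : List Char :=
  PySem.Chars.join [' ']
    ((PySem.List.pyRange 0 bh 1).foldl
      (fun (st : List (List Char) × List (List Char)) _ =>
        (st.1 ++ st.2.take bw.toNat ++ [['|']], st.2.drop bw.toNat))
      ([['|']], row.map (pvFmtCell_B cl))).1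

def format_sudoku_board_alt (board : List (List (Option Int))) (box_height : Int) (box_width : Int) : String :=
  let size := box_height * box_width
  let width : Int := ((PySem.Int.toChars size).length : Int)
  let sep := PySem.List.pyRepeat ("+-".toList ++ PySem.List.pyRepeat ['-'] ((width + 1) * box_width)) box_height ++ ['+']
  if board = [] then ""
  else
    let cuts := (PySem.List.pyRange 1 ((board.length : Int) + 1) 1).filter
      (fun m => PySem.Int.mod m box_height == 0)
    let st := cuts.foldl
      (fun (st : List (List Char) × Int) c =>
        (st.1 ++ (PySem.List.slice board (some st.2) (some c)).map (pvRender_B width box_height box_width) ++ [sep], c))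
      ([sep], 0)
    let lines := st.1 ++ (PySem.List.slice board (some st.2) none).map (pvRender_B width box_height box_width)
    String.ofList (PySem.Chars.join ['\n'] lines ++ ['\n'])

-- ===== PRECONDITION & SPEC =====
-- Pre_ is exactly the set of inputs on which the Python A returns: box_height = 0 with a nonempty
-- board makes A's (i+1) % box_height raise ZeroDivisionError, and a row with fewer cells than the
-- template's max(bh,0)*max(bw,0) placeholders makes A's .format raise IndexError (B raises on both
-- kinds of input too).
def Pre_format_sudoku_board (board : List (List (Option Int))) (box_height : Int) (box_width : Int) : Prop :=
  (box_height ≠ 0 ∨ board = []) ∧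
    ∀ row ∈ board, max box_height 0 * max box_width 0 ≤ (row.length : Int)
instance (board : List (List (Option Int))) (box_height : Int) (box_width : Int) : Decidable (Pre_format_sudoku_board board box_height box_width) := by unfold Pre_format_sudoku_board; infer_instance

def pvWitness_format_sudoku_board : List (List (Option Int)) × Int × Int :=
  ([[some 1, none], [some 0, some 5]], 2, 1)

def Spec_format_sudoku_board (board : List (List (Option Int))) (box_height : Int) (box_width : Int) (out : String) : Prop := out = format_sudoku_board_alt board box_height box_width
instance (board : List (List (Option Int))) (box_height : Int) (box_width : Int) (out : String) : Decidable (Spec_format_sudoku_board board box_height box_width out) := by unfold Spec_format_sudoku_board; infer_instance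

-- ===== CLAIM (what is proved, stated in full; the proofs are below) =====
def Claim_equal_format_sudoku_board : Prop := ∀ (board : List (List (Option Int))) (box_height : Int) (box_width : Int), Dom_format_sudoku_board board box_height box_width → Pre_format_sudoku_board board box_height box_width → Spec_format_sudoku_board board box_height box_width (format_sudoku_board board box_height box_width)

-- ===== LEMMAS AND PROOFS =====

-- proof-side Nat form of Python's list/str '*'
def pvRep (xs : List Char) (n : Nat) : List Char := (List.replicate n xs).flatten

lemma pvRep_eq (xs : List Char) (n : Int) : PySem.List.pyRepeat xs n = pvRep xs n.toNat := rfl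

lemma pvRep_flat (m w : Nat) : pvRep (List.replicate m '-') w = List.replicate (w * m) '-' := by
  induction w with
  | zero => simp [pvRep]
  | succ k ih =>
      simp only [pvRep, List.replicate_succ, List.flatten_cons] at ih ⊢
      rw [ih, Nat.succ_mul, Nat.add_comm, List.replicate_add]

lemma pv_toNat_mul (a b : Int) (ha : 0 ≤ a) : (a * b).toNat = a.toNat * b.toNat := by
  rcases Int.lt_or_le b 0 with hb | hb
  swap
  · obtain ⟨m, rfl⟩ : ∃ m : Nat, a = (m : Int) := ⟨a.toNat, (Int.toNat_of_nonneg ha).symm⟩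
    obtain ⟨n, rfl⟩ : ∃ n : Nat, b = (n : Int) := ⟨b.toNat, (Int.toNat_of_nonneg hb).symm⟩
    rw [← Nat.cast_mul, Int.toNat_natCast, Int.toNat_natCast, Int.toNat_natCast]
  · have h1 : a * b ≤ 0 := mul_nonpos_iff.mpr (Or.inl ⟨ha, hb.le⟩)
    have h2 : b.toNat = 0 := by omega
    rw [h2, Nat.mul_zero]
    omega

lemma pv_fill_space (rest args) : pvFill (' ' :: rest) args = (pvFill rest args).map (' ' :: ·) := by
  simp [pvFill]

lemma pv_fill_pipe (rest args) : pvFill ('|' :: rest) args = (pvFill rest args).map ('|' :: ·) := by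
  simp [pvFill]

lemma pv_fill_block (w : Nat) (rest : List Char) (front args : List (List Char))
    (h : front.length = w) :
    pvFill (pvRep ['{', '}', ' '] w ++ rest) (front ++ args)
      = (pvFill rest args).map (fun t => (front.map (· ++ [' '])).flatten ++ t) := by
  induction w generalizing front with
  | zero =>
      have : front = [] := List.eq_nil_of_length_eq_zero h
      subst this
      simp [pvRep]
  | succ k ih =>
      cases front with
      | nil => simp at h
      | cons a front' =>
          have hlen : front'.length = k := by simpa using h
          simp only [pvRep, List.replicate_succ, List.flatten_cons, List.cons_append,
            List.append_assoc] at ih ⊢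
          simp only [List.nil_append, pvFill, pv_fill_space]
          rw [ih front' hlen]
          cases pvFill rest args <;> simp

-- the '{}'-template of A filled with the first B*W cells, box by box
lemma pv_fill_main (B W : Nat) (front args : List (List Char)) (h : front.length = B * W) :
    pvFill (pvRep ('|' :: ' ' :: pvRep ['{', '}', ' '] W) B ++ ['|']) (front ++ args)
      = some ((((List.range B).map (fun b =>
          '|' :: ' ' :: (((front.drop (b * W)).take W).map (· ++ [' '])).flatten)).flatten) ++ ['|']) := by
  induction B generalizing front args with
  | zero =>
      have : front = [] := List.eq_nil_of_length_eq_zero (by simpa using h)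
      subst this
      simp [pvRep, pvFill]
  | succ n ih =>
      have htlen : (front.take W).length = W := by simp [h]; nlinarith
      have hdlen : (front.drop W).length = n * W := by simp [h]; ring_nf; omega
      have hblock := pv_fill_block W
        ((pvRep ('|' :: ' ' :: pvRep ['{', '}', ' '] W) n) ++ ['|'])
        (front.take W) (front.drop W ++ args) htlen
      have hih := ih (front.drop W) args hdlen
      have hsplit : front ++ args = front.take W ++ (front.drop W ++ args) := by
        rw [← List.append_assoc, List.take_append_drop]
      rw [hsplit]
      simp only [pvRep, List.replicate_succ, List.flatten_cons, List.cons_append,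
        List.append_assoc] at hblock hih ⊢
      rw [pv_fill_pipe, pv_fill_space, hblock, hih]
      rw [List.range_succ_eq_map, List.map_cons, List.map_map]
      simp only [List.flatten_cons, Nat.zero_mul, List.drop_zero]
      have : (List.map (fun b => '|' :: ' ' :: ((((front.drop W).drop (b * W)).take W).map (· ++ [' '])).flatten) (List.range n))
           = (List.map ((fun b => '|' :: ' ' :: (((front.drop (b * W)).take W).map (· ++ [' '])).flatten) ∘ (· + 1)) (List.range n)) := by
        refine List.map_congr_left (fun b _ => ?_)
        simp [List.drop_drop, show W + b * W = (b + 1) * W from by ring]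
      rw [this]
      simp [List.append_assoc]

-- ' '.join over an appended tail
lemma pv_join_append (xs ys : List (List Char)) (h : ys ≠ []) :
    PySem.Chars.join [' '] (xs ++ ys)
      = (xs.map (· ++ [' '])).flatten ++ PySem.Chars.join [' '] ys := by
  induction xs with
  | nil => simp
  | cons x xs' ih =>
      cases hxy : xs' ++ ys with
      | nil =>
          cases ys with
          | nil => exact absurd rfl h
          | cons a b => simp at hxy
      | cons z zs =>
          rw [List.cons_append, hxy, PySem.Chars.join_cons_cons, ← hxy, ih]
          simp [List.append_assoc]

-- the ' '-join of pipe-interleaved chunks is A's per-box concatenation closed with '|'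
lemma pv_interleave : ∀ (bs : List (List (List Char))),
    PySem.Chars.join [' '] ([['|']] ++ (bs.map (fun c => c ++ [['|']])).flatten)
      = (bs.map (fun c => '|' :: ' ' :: (c.map (· ++ [' '])).flatten)).flatten ++ ['|']
  | [] => by simp [PySem.Chars.join_singleton]
  | c :: bs' => by
      have hre : ([['|']] : List (List Char)) ++ ((c :: bs').map (fun c => c ++ [['|']])).flatten
          = (([['|']] ++ c) ++ ([['|']] ++ (bs'.map (fun c => c ++ [['|']])).flatten)) := by
        simp [List.append_assoc]
      rw [hre, pv_join_append _ _ (by simp), pv_interleave bs']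
      simp [List.append_assoc]

-- Source B's render loop: each iteration consumes bw.toNat cells and closes a chunk with '|'
lemma pv_render_loop (W : Nat) : ∀ (l : List Int) (p cs : List (List Char)),
    l.foldl (fun (st : List (List Char) × List (List Char)) _ =>
        (st.1 ++ st.2.take W ++ [['|']], st.2.drop W)) (p, cs)
      = (p ++ ((List.range l.length).map (fun j => (cs.drop (j * W)).take W ++ [['|']])).flatten,
         cs.drop (l.length * W))
  | [], p, cs => by simp
  | _ :: t, p, cs => by
      rw [List.foldl_cons]
      show List.foldl _ (p ++ cs.take W ++ [['|']], cs.drop W) t = _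
      rw [pv_render_loop W t]
      simp only [List.length_cons]
      refine Prod.ext ?_ ?_
      · show (p ++ cs.take W ++ [['|']]) ++ _ = _
        rw [List.range_succ_eq_map, List.map_cons, List.flatten_cons, List.map_map]
        have hmaps : (List.range t.length).map
              ((fun j => (cs.drop (j * W)).take W ++ [['|']]) ∘ (· + 1))
            = (List.range t.length).map (fun j => ((cs.drop W).drop (j * W)).take W ++ [['|']]) := by
          refine List.map_congr_left (fun j _ => ?_)
          simp only [Function.comp_apply]
          rw [List.drop_drop]
          have : (j + 1) * W = W + j * W := by ring
          rw [this]
        rw [hmaps]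
        simp [List.append_assoc]
      · show (cs.drop W).drop (t.length * W) = _
        rw [List.drop_drop]
        have : (t.length + 1) * W = t.length * W + W := by ring
        rw [this, Nat.add_comm]

-- the per-row line: A's .format of the '{}' template is B's render(row)
lemma pv_line_eq (bh bw cl : Int) (row : List (Option Int))
    (hrow : bh.toNat * bw.toNat ≤ row.length) :
    pvFill (pvRep ('|' :: ' ' :: pvRep ['{', '}', ' '] bw.toNat) bh.toNat ++ ['|'])
        (row.map (pvFmtCell_A cl))
      = some (pvRender_B cl bh bw row) := by
  have hcell : pvFmtCell_B = pvFmtCell_A := rfl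
  set B := bh.toNat with hB
  set W := bw.toNat with hW
  have hsplit : row.map (pvFmtCell_A cl)
      = (row.take (B * W)).map (pvFmtCell_A cl) ++ (row.drop (B * W)).map (pvFmtCell_A cl) := by
    rw [← List.map_append, List.take_append_drop]
  rw [hsplit, pv_fill_main B W _ _ (by simp; omega)]
  unfold pvRender_B
  rw [hcell, ← hW]
  have hlen : (PySem.List.pyRange 0 bh 1).length = B := by
    rw [PySem.List.length_pyRange_one]
    simp [hB]
  rw [pv_render_loop W (PySem.List.pyRange 0 bh 1) [['|']] (row.map (pvFmtCell_A cl))]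
  simp only [hlen]
  have hbs : (List.range B).map (fun j => ((row.map (pvFmtCell_A cl)).drop (j * W)).take W ++ [['|']])
      = ((List.range B).map (fun j => ((row.map (pvFmtCell_A cl)).drop (j * W)).take W)).map
          (fun c => c ++ [['|']]) := by
    rw [List.map_map]
    rfl
  rw [hbs, pv_interleave]
  refine congrArg some ?_
  congr 1
  rw [List.map_map]
  refine congrArg List.flatten (List.map_congr_left (fun b hb => ?_))
  simp only [Function.comp_apply]
  have hb' := List.mem_range.mp hb
  have h2 : (b + 1) * W ≤ B * W := Nat.mul_le_mul_right W hb'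
  have h3 : (b + 1) * W = b * W + W := by ring
  have hfront : (((row.take (B * W)).map (pvFmtCell_A cl)).drop (b * W)).take W
      = ((row.map (pvFmtCell_A cl)).drop (b * W)).take W := by
    rw [List.map_take, List.drop_take, List.take_take]
    have hmin : min W (B * W - b * W) = W := by omega
    rw [hmin]
  rw [hfront]

-- proof-side spine: per-row lines with a separator after the rows where C holds
def pvLines (sep : List Char) (L : List (Option Int) → List Char) (C : Int → Bool) :
    Int → List (List (Option Int)) → List (List Char)
  | _, [] => []
  | k, r :: rs => ([L r] ++ (if C k then [sep] else [])) ++ pvLines sep L C (k + 1) rs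

lemma pvLines_congr (sep : List Char) (L : List (Option Int) → List Char) (C C' : Int → Bool)
    (h : ∀ k, C k = C' k) : ∀ (k : Int) (rows : List (List (Option Int))),
    pvLines sep L C k rows = pvLines sep L C' k rows := by
  intro k rows
  induction rows generalizing k with
  | nil => rfl
  | cons r rs ih => simp only [pvLines, h, ih]

lemma pv_join_nl (l : List Char) (ls : List (List Char)) :
    PySem.Chars.join ['\n'] (l :: ls) ++ ['\n'] = ((l :: ls).map (· ++ ['\n'])).flatten := by
  induction ls generalizing l with
  | nil => simp [PySem.Chars.join_singleton]
  | cons y t ih =>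
      rw [PySem.Chars.join_cons_cons]
      simp only [List.map_cons, List.flatten_cons] at ih ⊢
      rw [← ih y]
      simp

lemma pv_foldA (templ sepA sep : List Char) (L : List (Option Int) → List Char)
    (size bh cl : Int) (hsep : sepA = sep ++ ['\n']) :
    ∀ (rows : List (List (Option Int))) (k : Int) (t : List Char),
    1 ≤ k →
    (∀ r ∈ rows, pvFill templ (r.map (pvFmtCell_A cl)) = some (L r)) →
    (PySem.List.enumerate rows k).foldl
      (fun acc p => acc.bind (fun t =>
        (pvFill templ (p.2.map (pvFmtCell_A cl))).map (fun line =>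
          if p.1 = size - 1 ∨ PySem.Int.mod (p.1 + 1) bh = 0
          then ((if p.1 = 0 then t ++ sepA else t) ++ line ++ ['\n']) ++ sepA
          else (if p.1 = 0 then t ++ sepA else t) ++ line ++ ['\n'])))
      (some t)
    = some (t ++ ((pvLines sep L
        (fun k => decide (k = size - 1 ∨ PySem.Int.mod (k + 1) bh = 0)) k rows).map (· ++ ['\n'])).flatten) := by
  intro rows
  induction rows with
  | nil => intro k t _ _; simp [PySem.List.enumerate_nil, pvLines]
  | cons r rs ih =>
      intro k t hk hfill
      rw [PySem.List.enumerate_cons, List.foldl_cons]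
      have hne : ¬ (k = 0) := by omega
      simp only [Option.bind_some, hne, if_false, hfill r (by simp)]
      simp only [Option.map_some]
      rw [ih (k + 1) _ (by omega) (fun r hr => hfill r (by simp [hr]))]
      simp only [pvLines]
      by_cases hc : k = size - 1 ∨ PySem.Int.mod (k + 1) bh = 0 <;>
        simp [hc, hsep, List.append_assoc]

-- under bh ∣ size the 'i == size-1' disjunct is redundant, and mod bh = 0 is |bh|-divisibility
lemma pv_cond_eq (bh bw : Int) (H : Nat) (hH : H = bh.natAbs) (k : Int) :
    (decide (k = bh * bw - 1 ∨ PySem.Int.mod (k + 1) bh = 0) : Bool)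
      = decide (PySem.Int.mod (k + 1) (H : Int) = 0) := by
  subst hH
  simp only [decide_eq_decide, PySem.Int.mod_eq_zero_iff_dvd, Int.natAbs_dvd]
  constructor
  · rintro (rfl | h)
    · exact ⟨bw, by ring⟩
    · exact h
  · exact Or.inr

-- one block of rows: the separator fires exactly after the block's last row
lemma pv_block (sep : List Char) (L : List (Option Int) → List Char) (B : Nat) :
    ∀ (blk rest : List (List (Option Int))) (i : Int),
    1 ≤ blk.length → blk.length ≤ B →
    PySem.Int.mod (i + (blk.length : Int)) (B : Int) = 0 →
    pvLines sep L (fun k => decide (PySem.Int.mod (k + 1) (B : Int) = 0)) i (blk ++ rest)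
      = (blk.map L ++ [sep]) ++
        pvLines sep L (fun k => decide (PySem.Int.mod (k + 1) (B : Int) = 0)) (i + (blk.length : Int)) rest := by
  intro blk
  induction blk with
  | nil => intro rest i h1 _ _; simp at h1
  | cons r blk' ih =>
      intro rest i h1 h2 hmod
      rw [List.cons_append]
      cases blk' with
      | nil =>
          have hm1 : PySem.Int.mod (i + 1) (B : Int) = 0 := by simpa using hmod
          simp only [pvLines]
          simp [hm1]
      | cons d t =>
          have hlen : 2 ≤ (r :: d :: t).length := by simp
          have hB2 : 2 ≤ B := by simp at h2 hlen; omega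
          have hnot : ¬ PySem.Int.mod (i + 1) (B : Int) = 0 := by
            intro h0
            rw [PySem.Int.mod_eq_zero_iff_dvd] at h0 hmod
            have hd : (B : Int) ∣ ((r :: d :: t).length : Int) - 1 := by
              have := Int.dvd_sub hmod h0
              simpa [sub_sub_cancel_left, show i + ((r :: d :: t).length : Int) - (i + 1)
                = ((r :: d :: t).length : Int) - 1 from by ring] using this
            have hpos : (0 : Int) < ((r :: d :: t).length : Int) - 1 := by
              simp
            have := Int.le_of_dvd hpos hd
            simp at this h2
            omega
          simp only [pvLines, decide_eq_true_eq]
          rw [if_neg hnot]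
          have hmod' : PySem.Int.mod ((i + 1) + ((d :: t).length : Int)) (B : Int) = 0 := by
            have : (i + 1) + ((d :: t).length : Int) = i + ((r :: d :: t).length : Int) := by
              simp; ring
            rw [this]; exact hmod
          rw [ih rest (i + 1) (by simp) (by simp at h2 ⊢; omega) hmod']
          simp only [List.map_cons]
          have : i + 1 + ((d :: t).length : Int) = i + ((r :: d :: t).length : Int) := by
            simp; ring
          rw [this]
          simp [List.append_assoc]

-- a ragged tail shorter than a block gets no separator at all
lemma pv_tail (sep : List Char) (L : List (Option Int) → List Char) (H : Nat) :
    ∀ (tail : List (List (Option Int))) (i : Int),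
    (∀ p : Nat, p < tail.length → ¬ PySem.Int.mod (i + (p : Int) + 1) (H : Int) = 0) →
    pvLines sep L (fun k => decide (PySem.Int.mod (k + 1) (H : Int) = 0)) i tail = tail.map L := by
  intro tail
  induction tail with
  | nil => intro i _; rfl
  | cons r t ih =>
      intro i h
      have h0 : ¬ PySem.Int.mod (i + 1) (H : Int) = 0 := by
        have := h 0 (by simp)
        simpa using this
      simp only [pvLines, decide_eq_true_eq]
      rw [if_neg h0, ih (i + 1) (fun p hp => by
        have hthis := h (p + 1) (by simpa using Nat.succ_lt_succ hp)
        push_cast at hthis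
        have he : i + ((p : Int) + 1) + 1 = i + 1 + (p : Int) + 1 := by ring
        rw [he] at hthis
        exact hthis)]
      simp

-- a board of m complete blocks and a ragged tail
lemma pv_blocks_ragged (sep : List Char) (L : List (Option Int) → List Char) (H : Nat) (hH : 1 ≤ H) :
    ∀ (m : Nat) (board : List (List (Option Int))) (i : Int) (t : Nat),
    board.length = m * H + t → t < H → (H : Int) ∣ i →
    pvLines sep L (fun k => decide (PySem.Int.mod (k + 1) (H : Int) = 0)) i board
      = ((List.range m).map (fun j => ((board.drop (j * H)).take H).map L ++ [sep])).flatten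
          ++ (board.drop (m * H)).map L := by
  intro m
  induction m with
  | zero =>
      intro board i t hlen ht hdvd
      rw [pv_tail sep L H board i (fun p hp h0 => by
        rw [PySem.Int.mod_eq_zero_iff_dvd] at h0
        have hd : (H : Int) ∣ ((p : Int) + 1) := by
          have := Int.dvd_sub h0 hdvd
          simpa [show i + (p : Int) + 1 - i = (p : Int) + 1 from by ring] using this
        have := Int.le_of_dvd (by omega) hd
        omega)]
      simp
  | succ n ih =>
      intro board i t hlen ht hdvd
      have hBle : H ≤ board.length := by rw [hlen]; nlinarith
      have hsplit : board = board.take H ++ board.drop H := (List.take_append_drop H board).symm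
      have htlen : (board.take H).length = H := by simp; omega
      have hmod' : PySem.Int.mod (i + ((H : Nat) : Int)) (H : Int) = 0 := by
        rw [PySem.Int.mod_eq_zero_iff_dvd]
        exact dvd_add hdvd ⟨1, by ring⟩
      conv_lhs => rw [hsplit]
      rw [pv_block sep L H (board.take H) (board.drop H) i (by omega) (by omega)
        (by rw [htlen]; exact hmod'), htlen]
      have hmul : (n + 1) * H = n * H + H := by ring
      rw [ih (board.drop H) (i + ((H : Nat) : Int)) t
        (by simp only [List.length_drop]; omega)
        ht (by rw [PySem.Int.mod_eq_zero_iff_dvd] at hmod'; exact hmod')]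
      rw [List.range_succ_eq_map, List.map_cons, List.flatten_cons, List.map_map]
      have h0 : List.take H (List.drop (0 * H) board) = List.take H board := by simp
      have hmaps : (List.range n).map
            ((fun j => ((board.drop (j * H)).take H).map L ++ [sep]) ∘ (· + 1))
          = (List.range n).map
            (fun j => (((board.drop H).drop (j * H)).take H).map L ++ [sep]) := by
        refine List.map_congr_left (fun j _ => ?_)
        simp only [Function.comp_apply]
        rw [List.drop_drop]
        have : (j + 1) * H = H + j * H := by ring
        rw [this]
      have hdrop : (board.drop H).drop (n * H) = board.drop ((n + 1) * H) := by
        rw [List.drop_drop]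
        congr 1
        omega
      rw [h0, hmaps, hdrop]
      simp [List.append_assoc]

-- the cut positions: the multiples of |bh| in [1, n]
lemma pv_cuts (bh : Int) (hbh : bh ≠ 0) (H : Nat) (hH : H = bh.natAbs) : ∀ (n : Nat),
    (PySem.List.pyRange 1 ((n : Int) + 1) 1).filter (fun m => PySem.Int.mod m bh == 0)
      = (List.range (n / H)).map (fun j => (((j + 1) * H : Nat) : Int)) := by
  have hH1 : 1 ≤ H := by
    subst hH
    omega
  intro n
  induction n with
  | zero =>
      rw [show (((0 : Nat) : Int) + 1) = 1 from by simp,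
        PySem.List.pyRange_one_eq_nil (by omega)]
      rw [List.filter_nil, Nat.zero_div, List.range_zero, List.map_nil]
  | succ k ih =>
      have hstep : PySem.List.pyRange 1 (((k + 1 : Nat) : Int) + 1) 1
          = PySem.List.pyRange 1 ((k : Nat) + 1) 1 ++ [((k : Nat) : Int) + 1] := by
        have : (((k + 1 : Nat) : Int) + 1) = (((k : Nat) : Int) + 1) + 1 := by push_cast; ring
        rw [this, PySem.List.pyRange_one_succ_right (by omega)]
      rw [hstep, List.filter_append, ih]
      have hdec : (PySem.Int.mod (((k : Nat) : Int) + 1) bh == 0)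
          = decide (H ∣ (k + 1)) := by
        rw [Bool.eq_iff_iff]
        simp only [beq_iff_eq, decide_eq_true_eq, PySem.Int.mod_eq_zero_iff_dvd]
        rw [hH, ← Int.natCast_dvd_natCast, Int.natAbs_dvd]
        norm_cast
      by_cases hdvd : H ∣ (k + 1)
      · have hq : (k + 1) / H = k / H + 1 := by
          rw [Nat.succ_div, if_pos hdvd]
        rw [hq, List.range_succ, List.map_append]
        simp only [List.filter_cons, List.filter_nil, hdec, hdvd, decide_true, if_true]
        congr 1
        simp only [List.map_cons, List.map_nil]
        congr 1
        have : (k / H + 1) * H = k + 1 := by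
          have h1 : H * ((k + 1) / H) = k + 1 := Nat.mul_div_cancel' hdvd
          rw [hq] at h1
          rw [Nat.mul_comm]
          exact h1
        rw [this]
        push_cast
        ring
      · have hq : (k + 1) / H = k / H := by
          rw [Nat.succ_div, if_neg hdvd]
          omega
        rw [hq]
        simp only [List.filter_cons, List.filter_nil, hdec, hdvd, decide_false]
        simp

-- the segment fold of B: each cut closes one block of H rows
lemma pv_segfold (board : List (List (Option Int))) (render : List (Option Int) → List Char)
    (sep : List Char) (H : Nat) : ∀ (m : Nat),
    (((List.range m).map (fun j => (((j + 1) * H : Nat) : Int))).foldl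
      (fun (st : List (List Char) × Int) c =>
        (st.1 ++ (PySem.List.slice board (some st.2) (some c)).map render ++ [sep], c))
      ([sep], 0))
    = ([sep] ++ ((List.range m).map (fun j => ((board.drop (j * H)).take H).map render ++ [sep])).flatten,
       ((m * H : Nat) : Int)) := by
  intro m
  induction m with
  | zero => simp
  | succ n ih =>
      rw [List.range_succ, List.map_append, List.foldl_append, ih]
      simp only [List.map_cons, List.map_nil, List.foldl_cons, List.foldl_nil]
      refine Prod.ext ?_ rfl
      show ([sep] ++ _) ++ _ ++ [sep] = _
      have hslice : PySem.List.slice board (some ((n * H : Nat) : Int)) (some (((n + 1) * H : Nat) : Int))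
          = (board.drop (n * H)).take H := by
        have : (((n + 1) * H : Nat) : Int) = ((n * H : Nat) : Int) + ((H : Nat) : Int) := by
          push_cast; ring
        rw [this, PySem.List.slice_natCast_add]
      rw [hslice, List.map_append, List.flatten_append]
      simp [List.append_assoc]

-- ===== VERDICT (by name: the statement is the Claim_ definition above) =====
theorem format_sudoku_board_spec : Claim_equal_format_sudoku_board := by
  intro board bh bw _ hpre
  obtain ⟨hbh0, hrows⟩ := hpre
  unfold Spec_format_sudoku_board
  cases board with
  | nil =>
      simp [format_sudoku_board, format_sudoku_board_alt, PySem.List.enumerate_nil]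
  | cons r rs =>
      have hbh : bh ≠ 0 := by
        rcases hbh0 with h | h
        · exact h
        · exact absurd h (List.cons_ne_nil r rs)
      set H := bh.natAbs with hHdef
      have hH1 : 1 ≤ H := by rw [hHdef]; omega
      simp only [format_sudoku_board, format_sudoku_board_alt, PySem.List.enumerate_cons,
        List.foldl_cons, if_neg (List.cons_ne_nil r rs)]
      set size : Int := bh * bw with hsize
      set C := (PySem.Int.toChars size).length with hC
      set sepA := PySem.List.pyRepeat ("+-".toList ++ PySem.List.pyRepeat (PySem.List.pyRepeat ['-'] ((C : Int) + 1)) bw) bh ++ "+\n".toList with hsA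
      set sepB := PySem.List.pyRepeat ("+-".toList ++ PySem.List.pyRepeat ['-'] (((C : Int) + 1) * bw)) bh ++ ['+'] with hsB
      set templ := PySem.List.pyRepeat ("| ".toList ++ PySem.List.pyRepeat "{} ".toList bw) bh ++ "|".toList with hT
      set L := pvRender_B (C : Int) bh bw with hL
      have hunit : "+-".toList ++ PySem.List.pyRepeat (PySem.List.pyRepeat ['-'] ((C : Int) + 1)) bw
          = "+-".toList ++ PySem.List.pyRepeat ['-'] (((C : Int) + 1) * bw) := by
        have e : (((C : Int) + 1) * bw).toNat = bw.toNat * ((C : Int) + 1).toNat := by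
          rw [pv_toNat_mul ((C : Int) + 1) bw (by omega), Nat.mul_comm]
        rw [PySem.List.pyRepeat_singleton, PySem.List.pyRepeat_singleton, pvRep_eq, pvRep_flat, e]
      have hsep : sepA = sepB ++ ['\n'] := by
        rw [hsA, hsB, hunit]
        simp
      have htempl : templ = pvRep ('|' :: ' ' :: pvRep ['{', '}', ' '] bw.toNat) bh.toNat ++ ['|'] := by
        rw [hT, pvRep_eq, pvRep_eq]
        rfl
      have hfill : ∀ row ∈ r :: rs, pvFill templ (row.map (pvFmtCell_A (C : Int)))
          = some (L row) := by
        intro row hr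
        rw [htempl, hL]
        refine pv_line_eq bh bw (C : Int) row ?_
        have hthis := hrows row hr
        have h1 : max bh 0 = (bh.toNat : Int) := by omega
        have h2 : max bw 0 = (bw.toNat : Int) := by omega
        rw [h1, h2, ← Nat.cast_mul] at hthis
        exact_mod_cast hthis
      -- A side
      rw [hfill r (by simp)]
      simp only [Option.bind_some, Option.map_some, List.nil_append, zero_add]
      rw [pv_foldA templ sepA sepB L size bh (C : Int) hsep rs 1 _ (by omega)
        (fun row hr => hfill row (by simp [hr]))]
      simp only [Option.getD_some]
      have hcond : ∀ k, (decide (k = size - 1 ∨ PySem.Int.mod (k + 1) bh = 0) : Bool)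
          = decide (PySem.Int.mod (k + 1) (H : Int) = 0) := by
        intro k
        rw [hsize]
        exact pv_cond_eq bh bw H hHdef k
      rw [pvLines_congr sepB L _ _ hcond 1 rs]
      -- B side
      set n := (r :: rs).length with hn
      set m := n / H with hm
      rw [pv_cuts bh hbh H hHdef n, pv_segfold (r :: rs) L sepB H m]
      rw [PySem.List.slice_from_natCast]
      have hlines : (([sepB] ++ ((List.range m).map
              (fun j => (((r :: rs).drop (j * H)).take H).map L ++ [sepB])).flatten)
            ++ ((r :: rs).drop (m * H)).map L)
          = sepB :: pvLines sepB L (fun k => decide (PySem.Int.mod (k + 1) (H : Int) = 0)) 0 (r :: rs) := by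
        rw [pv_blocks_ragged sepB L H hH1 m (r :: rs) 0 (n % H)
          (by rw [hm, Nat.mul_comm]; exact (Nat.div_add_mod n H).symm)
          (Nat.mod_lt n (by omega))
          (dvd_zero _)]
        simp
      rw [hlines, pv_join_nl]
      -- final head comparison
      show String.ofList _ = String.ofList _
      congr 1
      simp only [pvLines, List.map_cons, List.map_append, List.flatten_cons, List.flatten_append]
      by_cases hc : (0 : Int) = size - 1 ∨ PySem.Int.mod 1 bh = 0
      · have hc' : PySem.Int.mod (1 : Int) (H : Int) = 0 := by
          have h := hcond 0
          simp only [zero_add, decide_eq_decide] at h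
          exact h.mp hc
        rw [if_pos hc]
        simp [hc', hsep, List.append_assoc]
      · have hc' : ¬ PySem.Int.mod (1 : Int) (H : Int) = 0 := by
          have h := hcond 0
          simp only [zero_add, decide_eq_decide] at h
          exact fun h0 => hc (h.mpr h0)
        rw [if_neg hc]
        simp [hc', hsep, List.append_assoc]
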